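-- pv_equiv track=rewrite | github.com/pakxe/coding-test | 백준/Silver/1018. 체스판 다시 칠하기/체스판 다시 칠하기.py | calcRedrawCountInLine
-- ===== SOURCE A (Python) =====
-- W = 'W'
--
-- B = 'B'
--
-- def calcRedrawCountInLine (startColor, line):
--     totalRedrawCount = 0
--
--     for i in range(len(line)):
--         cur = line[i]
--
--         if startColor == W:
--             if i % 2 == 0 and cur != W:
--                 totalRedrawCount += 1
--             if i % 2 == 1 and cur != B:
--                 totalRedrawCount += 1
--
--         else:
--             if i % 2 == 0 and cur != B:
--                 totalRedrawCount += 1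
--             if i % 2 == 1 and cur != W:
--                 totalRedrawCount += 1
--
--     return totalRedrawCount
-- ===== SOURCE B (Python) =====
-- W = 'W'
--
-- B = 'B'
--
-- def calcRedrawCountInLine(startColor, line):
--     evenExpected, oddExpected = (W, B) if startColor == W else (B, W)
--     even, odd = line[0::2], line[1::2]
--     return (len(even) - even.count(evenExpected)) + (len(odd) - odd.count(oddExpected))
-- ===== Notes on version B (the rewrite author's own statement) =====
-- stated objective: faster
-- what changed: Replaces the per-index loop with its i%2 branching by splitting the line into the even- and odd-index subsequences via step-2 slices and counting mismatches with len/str.count, with no explicit Python-level loop.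
import Mathlib
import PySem

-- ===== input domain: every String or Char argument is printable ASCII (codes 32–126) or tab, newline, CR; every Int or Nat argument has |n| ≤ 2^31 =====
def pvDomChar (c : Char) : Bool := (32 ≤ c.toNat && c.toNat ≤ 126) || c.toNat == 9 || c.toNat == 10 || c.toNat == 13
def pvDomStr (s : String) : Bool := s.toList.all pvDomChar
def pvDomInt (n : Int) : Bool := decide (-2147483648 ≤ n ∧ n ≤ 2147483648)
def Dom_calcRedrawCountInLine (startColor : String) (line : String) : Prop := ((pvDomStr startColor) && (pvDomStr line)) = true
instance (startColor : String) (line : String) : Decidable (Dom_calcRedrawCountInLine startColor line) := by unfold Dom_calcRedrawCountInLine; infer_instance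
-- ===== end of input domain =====

-- B replaces A's per-index loop with i%2 branching by parity (step-2) slices plus len/count (measured faster in a timing run; same O(n)).

-- ===== PORT A =====
-- literal port of A: loop over the indexed characters, i % 2 tests, two sequential ifs per branch, accumulator
def calcRedrawCountInLine (startColor : String) (line : String) : Int :=
  (PySem.List.enumerate line.toList 0).foldl (fun totalRedrawCount ic =>
    let i := ic.1
    let cur := ic.2
    if startColor == "W" then
      let t1 := if PySem.Int.mod i 2 == 0 && cur != 'W' then totalRedrawCount + 1 else totalRedrawCount
      if PySem.Int.mod i 2 == 1 && cur != 'B' then t1 + 1 else t1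
    else
      let t1 := if PySem.Int.mod i 2 == 0 && cur != 'B' then totalRedrawCount + 1 else totalRedrawCount
      if PySem.Int.mod i 2 == 1 && cur != 'W' then t1 + 1 else t1) 0

-- ===== PORT B =====
-- literal port of Source B: expected colors per parity, step-2 slices, len minus count per parity class
def calcRedrawCountInLine_alt (startColor : String) (line : String) : Int :=
  let exps := if startColor == "W" then ("W", "B") else ("B", "W")
  let even := (PySem.Str.slice? line (some 0) none 2).getD ""
  let odd := (PySem.Str.slice? line (some 1) none 2).getD ""
  (PySem.Str.len even - (PySem.Str.count even exps.1 : Int)) +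
    (PySem.Str.len odd - (PySem.Str.count odd exps.2 : Int))

-- ===== PRECONDITION & SPEC =====
def Spec_calcRedrawCountInLine (startColor : String) (line : String) (out : Int) : Prop := out = calcRedrawCountInLine_alt startColor line
instance (startColor : String) (line : String) (out : Int) : Decidable (Spec_calcRedrawCountInLine startColor line out) := by unfold Spec_calcRedrawCountInLine; infer_instance

-- ===== CLAIM (what is proved, stated in full; the proofs are below) =====
def Claim_equal_calcRedrawCountInLine : Prop := ∀ (startColor : String) (line : String), Dom_calcRedrawCountInLine startColor line → Spec_calcRedrawCountInLine startColor line (calcRedrawCountInLine startColor line)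

-- ===== LEMMAS AND PROOFS =====

-- the elements at even indices
def pvEvens {α : Type} : List α → List α
  | [] => []
  | [x] => [x]
  | x :: _ :: t => x :: pvEvens t

theorem pvEvens_cons {α : Type} (x : α) (t : List α) : pvEvens (x :: t) = x :: pvEvens t.tail := by
  cases t <;> rfl

-- mismatch count against alternating expectations e, o, e, o, …
def pvMism (e o : Char) : List Char → Int
  | [] => 0
  | c :: t => (if c ≠ e then 1 else 0) + pvMism o e t

theorem pvMism_evens (e o : Char) (l : List Char) :
    pvMism e o l =
      (((pvEvens l).length : Int) - ((pvEvens l).count e : Int)) +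
        (((pvEvens l.tail).length : Int) - ((pvEvens l.tail).count o : Int)) := by
  induction l using pvEvens.induct generalizing e o with
  | case1 => simp [pvMism, pvEvens]
  | case2 x =>
    simp only [pvMism, pvEvens, List.length_cons, List.count_cons]
    by_cases h : x = e <;> simp [h]
  | case3 x y t ih =>
    rw [show pvMism e o (x :: y :: t) = (if x ≠ e then 1 else 0) + ((if y ≠ o then 1 else 0) + pvMism e o t) from rfl,
      ih e o]
    rw [show (x :: y :: t).tail = y :: t from rfl, pvEvens, pvEvens_cons]
    simp only [List.length_cons, List.count_cons]
    by_cases h1 : x = e <;> by_cases h2 : y = o <;> simp [h1, h2] <;> push_cast <;> ring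

theorem pvFmod_two (s : Int) : PySem.Int.mod s 2 = s % 2 := by
  simp [PySem.Int.mod, Int.fmod_eq_emod]

theorem pvFoldA (e o : Char) (l : List Char) (s : Int) (hs : 0 ≤ s) (acc : Int) :
    (PySem.List.enumerate l s).foldl (fun totalRedrawCount ic =>
        let i := ic.1
        let cur := ic.2
        let t1 := if PySem.Int.mod i 2 == 0 && cur != e then totalRedrawCount + 1 else totalRedrawCount
        if PySem.Int.mod i 2 == 1 && cur != o then t1 + 1 else t1) acc
      = acc + (if s % 2 = 0 then pvMism e o l else pvMism o e l) := by
  induction l generalizing s acc with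
  | nil => simp [PySem.List.enumerate, pvMism]
  | cons c t ih =>
    rw [PySem.List.enumerate_cons, List.foldl_cons]
    rcases Int.emod_two_eq_zero_or_one s with h | h
    · have h1 : (s + 1) % 2 = 1 := by omega
      rw [ih (s + 1) (by omega)]
      simp only [pvFmod_two, h, h1, pvMism]
      by_cases hc : c = e <;> simp [hc] <;> ring
    · have h1 : (s + 1) % 2 = 0 := by omega
      rw [ih (s + 1) (by omega)]
      simp only [pvFmod_two, h, h1, pvMism]
      by_cases hc : c = o <;> simp [hc] <;> ring

-- filterMap/range characterisation of every-second-element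
theorem pvCore (t : List Char) :
    List.filterMap (fun k : Nat => t[2 * k]?) (List.range ((t.length + 1) / 2)) = pvEvens t := by
  induction t using pvEvens.induct with
  | case1 => simp [pvEvens]
  | case2 x => simp [pvEvens, List.range_succ]
  | case3 x y r ih =>
    have hlen : ((x :: y :: r).length + 1) / 2 = ((r.length + 1) / 2) + 1 := by simp; omega
    rw [hlen, List.range_succ_eq_map, List.filterMap_cons, List.filterMap_map]
    have hf : ((fun k : Nat => (x :: y :: r)[2 * k]?) ∘ Nat.succ) = fun k : Nat => r[2 * k]? := by
      funext k
      simp [Nat.mul_succ]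
    rw [hf, ih]
    simp [pvEvens]

theorem pvSlice_even (l : List Char) :
    PySem.List.slice? l (some 0) none 2 = some (pvEvens l) := by
  rw [← pvCore l]
  simp only [PySem.List.slice?, PySem.List.sliceIndices]
  norm_num
  have harg : (if 0 < l.length then (((l.length : Int) + 2 - 1) / 2).toNat else 0) = (l.length + 1) / 2 := by
    split <;> omega
  rw [harg]
  apply List.filterMap_congr
  intro k _
  congr 1

theorem pvSlice_odd (l : List Char) :
    PySem.List.slice? l (some 1) none 2 = some (pvEvens l.tail) := by
  rw [← pvCore l.tail]
  simp only [PySem.List.slice?, PySem.List.sliceIndices]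
  norm_num
  have harg : (if 1 < l.length then (((l.length : Int) - min 1 (l.length : Int) + 2 - 1) / 2).toNat else 0)
      = (l.length - 1 + 1) / 2 := by split <;> omega
  rw [harg]
  apply List.filterMap_congr
  intro k hk
  simp only [List.mem_range] at hk
  congr 1
  omega

theorem pvCountGo (c : Char) (l : List Char) (fuel : Nat) (acc : Nat) (h : l.length ≤ fuel) :
    PySem.Chars.count.go [c] fuel l acc = acc + l.count c := by
  induction l generalizing fuel acc with
  | nil => cases fuel <;> simp [PySem.Chars.count.go]
  | cons x t ih =>
    cases fuel with
    | zero => simp at h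
    | succ f =>
      rw [PySem.Chars.count.go]
      simp only [List.length_cons] at h
      by_cases hc : c = x
      · subst hc
        simp [List.isPrefixOf, ih f (acc + 1) (by omega)]
        omega
      · simp [List.isPrefixOf, hc, ih f acc (by omega),
          show ¬ (x = c) from fun h' => hc h'.symm]

theorem pvCount_single (l : List Char) (c : Char) : PySem.Chars.count l [c] = l.count c := by
  unfold PySem.Chars.count
  simp [pvCountGo c l l.length 0 (le_refl _)]

theorem pvPortB_eq (sc line : String) :
    calcRedrawCountInLine_alt sc line =
      (if sc == "W" then pvMism 'W' 'B' line.toList else pvMism 'B' 'W' line.toList) := by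
  unfold calcRedrawCountInLine_alt
  have he : PySem.Str.slice? line (some 0) none 2 = some (String.ofList (pvEvens line.toList)) := by
    simp [PySem.Str.slice?, PySem.Chars.slice?_eq_listSlice?, pvSlice_even]
  have ho : PySem.Str.slice? line (some 1) none 2 = some (String.ofList (pvEvens line.toList.tail)) := by
    simp [PySem.Str.slice?, PySem.Chars.slice?_eq_listSlice?, pvSlice_odd]
  rw [he, ho]
  by_cases hw : (sc == "W") = true
  · simp only [hw, if_true, Option.getD_some, PySem.Str.len, PySem.Str.count,
      String.toList_ofList, show ("W" : String).toList = ['W'] from rfl,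
      show ("B" : String).toList = ['B'] from rfl, pvCount_single, pvMism_evens 'W' 'B' line.toList]
  · rw [Bool.not_eq_true] at hw
    simp only [hw, Bool.false_eq_true, if_false, Option.getD_some, PySem.Str.len, PySem.Str.count,
      String.toList_ofList, show ("W" : String).toList = ['W'] from rfl,
      show ("B" : String).toList = ['B'] from rfl, pvCount_single, pvMism_evens 'B' 'W' line.toList]

-- ===== VERDICT (by name: the statement is the Claim_ definition above) =====
theorem calcRedrawCountInLine_spec : Claim_equal_calcRedrawCountInLine := by
  intro sc line _
  unfold Spec_calcRedrawCountInLine calcRedrawCountInLine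
  rw [pvPortB_eq]
  by_cases hw : (sc == "W") = true
  · simp only [hw, if_true]
    simpa using pvFoldA 'W' 'B' line.toList 0 (by norm_num) 0
  · rw [Bool.not_eq_true] at hw
    simp only [hw, Bool.false_eq_true, if_false]
    simpa using pvFoldA 'B' 'W' line.toList 0 (by norm_num) 0
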